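-- pv_equiv track=rewrite | github.com/bestsemper/plan-your-future | scripts/fetch_course_details.py | find_resume_index
-- ===== SOURCE A (Python) =====
-- def subject_from_course_code(course_code: str) -> str:
--     return " ".join(str(course_code or "").split()).split(" ")[0].upper()
--
-- def find_resume_index(
--     subjects: list[tuple[str, str]],
--     existing_courses: dict[str, dict],
-- ) -> int | None:
--     """Return the subject index to resume from, or None to start fresh."""
--     if not existing_courses:
--         return None
--
--     present: set[str] = {
--         subject_from_course_code(c.get("course_code", ""))
--         for c in existing_courses.values()
--     }
--     present.discard("")
--
--     last_index = -1
--     for i, (code, _) in enumerate(subjects):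
--         if code.upper() in present:
--             last_index = i
--
--     return last_index + 1 if last_index >= 0 else None
-- ===== SOURCE B (Python) =====
-- def subject_from_course_code(course_code: str) -> str:
--     return " ".join(str(course_code or "").split()).split(" ")[0].upper()
--
-- def find_resume_index(
--     subjects: list[tuple[str, str]],
--     existing_courses: dict[str, dict],
-- ) -> int | None:
--     """Return the subject index to resume from, or None to start fresh."""
--     if not existing_courses:
--         return None
--
--     present: set[str] = {
--         subject_from_course_code(c.get("course_code", ""))
--         for c in existing_courses.values()
--     }
--     present.discard("")
--
--     for i in range(len(subjects) - 1, -1, -1):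
--         if subjects[i][0].upper() in present:
--             return i + 1
--
--     return None
-- ===== Notes on version B (the rewrite author's own statement) =====
-- stated objective: alternative
-- what changed: The forward accumulate-last-match-index loop over all subjects is replaced by a reverse scan that returns i+1 at the first match from the end (no accumulator, early exit); the set build is unchanged.
import Mathlib
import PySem

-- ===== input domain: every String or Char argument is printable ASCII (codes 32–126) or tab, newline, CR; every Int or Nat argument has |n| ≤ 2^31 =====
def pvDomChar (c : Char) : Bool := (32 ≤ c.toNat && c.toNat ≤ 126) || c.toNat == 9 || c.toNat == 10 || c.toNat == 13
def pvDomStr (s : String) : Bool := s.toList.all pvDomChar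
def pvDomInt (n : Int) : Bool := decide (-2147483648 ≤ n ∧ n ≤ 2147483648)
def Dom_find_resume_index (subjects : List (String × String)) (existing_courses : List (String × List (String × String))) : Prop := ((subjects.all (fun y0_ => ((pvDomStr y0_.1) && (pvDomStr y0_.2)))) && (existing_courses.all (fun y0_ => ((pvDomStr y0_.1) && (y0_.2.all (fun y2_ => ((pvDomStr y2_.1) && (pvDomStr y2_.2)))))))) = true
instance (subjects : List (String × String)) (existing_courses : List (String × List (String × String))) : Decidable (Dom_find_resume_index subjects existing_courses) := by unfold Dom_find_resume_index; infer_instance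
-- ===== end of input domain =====

-- B replaces A's forward accumulate-last-index loop with a reverse scan returning i+1 at the first match (alternative decomposition, same cost).

-- ===== PORT A =====
-- " ".join(str(course_code or "").split()).split(" ")[0].upper()
def subject_from_course_code (course_code : String) : String :=
  PySem.Str.upper
    (PySem.List.pyGetD
      ((PySem.Str.split? (PySem.Str.join " " (PySem.Str.split₀ (if course_code = "" then "" else course_code))) " ").getD [])
      0 "")

def pvPresent (existing_courses : List (String × List (String × String))) : PySem.Set String :=
  PySem.Set.discard
    (PySem.Set.ofList
      (existing_courses.map (fun c =>
        subject_from_course_code (PySem.Dict.getD (PySem.Dict.mk c.2) "course_code" ""))))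
    ""

def find_resume_index (subjects : List (String × String)) (existing_courses : List (String × List (String × String))) : Option Int :=
  if existing_courses = [] then none
  else
    let present := pvPresent existing_courses
    let last_index : Int :=
      (PySem.List.enumerate subjects 0).foldl
        (fun acc p => if PySem.Set.contains present (PySem.Str.upper p.2.1) then p.1 else acc) (-1)
    if last_index ≥ 0 then some (last_index + 1) else none

-- ===== PORT B =====
-- reverse scan: for i in range(len(subjects)-1, -1, -1): if subjects[i][0].upper() in present: return i+1
def pvScanBack (present : PySem.Set String) (subjects : List (String × String)) : Nat → Option Int
  | 0 => none
  | k + 1 =>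
    if PySem.Set.contains present (PySem.Str.upper (subjects.getD k ("", "")).1) then
      some ((k : Int) + 1)
    else pvScanBack present subjects k

def find_resume_index_alt (subjects : List (String × String)) (existing_courses : List (String × List (String × String))) : Option Int :=
  if existing_courses = [] then none
  else pvScanBack (pvPresent existing_courses) subjects subjects.length

-- ===== PRECONDITION & SPEC =====
def Spec_find_resume_index (subjects : List (String × String)) (existing_courses : List (String × List (String × String))) (out : Option Int) : Prop := out = find_resume_index_alt subjects existing_courses
instance (subjects : List (String × String)) (existing_courses : List (String × List (String × String))) (out : Option Int) : Decidable (Spec_find_resume_index subjects existing_courses out) := by unfold Spec_find_resume_index; infer_instance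

-- ===== CLAIM (what is proved, stated in full; the proofs are below) =====
def Claim_equal_find_resume_index : Prop := ∀ (subjects : List (String × String)) (existing_courses : List (String × List (String × String))), Dom_find_resume_index subjects existing_courses → Spec_find_resume_index subjects existing_courses (find_resume_index subjects existing_courses)

-- ===== LEMMAS AND PROOFS =====

-- scanning with fuel k ≤ xs.length ignores appended elements
theorem pvScanBack_append (present : PySem.Set String) (xs : List (String × String)) (x : String × String) :
    ∀ k, k ≤ xs.length → pvScanBack present (xs ++ [x]) k = pvScanBack present xs k := by
  intro k
  induction k with
  | zero => intro _; rfl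
  | succ k ih =>
    intro hk
    have hlt : k < xs.length := hk
    simp only [pvScanBack, List.getD, List.getElem?_append_left hlt, ih (Nat.le_of_lt hlt)]
    rfl

theorem pvLoop_eq (present : PySem.Set String) (subjects : List (String × String)) :
    (if (0 : Int) ≤ (PySem.List.enumerate subjects 0).foldl
        (fun acc p => if PySem.Set.contains present (PySem.Str.upper p.2.1) then p.1 else acc) (-1)
      then some ((PySem.List.enumerate subjects 0).foldl
        (fun acc p => if PySem.Set.contains present (PySem.Str.upper p.2.1) then p.1 else acc) (-1) + 1)
      else none)
      = pvScanBack present subjects subjects.length := by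
  induction subjects using List.reverseRecOn with
  | nil => simp [PySem.List.enumerate, pvScanBack]
  | append_singleton xs x ih =>
    rw [PySem.List.enumerate_append]
    simp only [List.foldl_append, PySem.List.enumerate_cons, PySem.List.enumerate_nil,
      List.foldl_cons, List.foldl_nil, List.length_append, List.length_singleton]
    by_cases h : PySem.Set.contains present (PySem.Str.upper x.1) = true
    · simp only [h, if_true]
      have h0 : (0 : Int) ≤ (0 : Int) + (xs.length : Int) := by positivity
      rw [if_pos h0]
      show _ = pvScanBack present (xs ++ [x]) (xs.length + 1)
      simp only [pvScanBack, List.getD, List.getElem?_append_right (Nat.le_refl xs.length),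
        Nat.sub_self, List.getElem?_cons_zero, Option.getD_some, h, if_true]
      congr 1
      omega
    · simp only [h]
      show _ = pvScanBack present (xs ++ [x]) (xs.length + 1)
      simp only [pvScanBack, List.getD, List.getElem?_append_right (Nat.le_refl xs.length),
        Nat.sub_self, List.getElem?_cons_zero, Option.getD_some, h]
      rw [pvScanBack_append present xs x xs.length (Nat.le_refl _)]
      exact ih

-- ===== VERDICT (by name: the statement is the Claim_ definition above) =====
theorem find_resume_index_spec : Claim_equal_find_resume_index := by
  intro subjects existing_courses _
  unfold Spec_find_resume_index find_resume_index find_resume_index_alt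
  by_cases h : existing_courses = []
  · simp [h]
  · simp only [h, ge_iff_le]
    exact pvLoop_eq (pvPresent existing_courses) subjects
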